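-- pv_equiv track=rewrite | github.com/lbaermann/hierarchical-emv | experiments/demo/create_demo.py | _read_messages_from_log
-- ===== SOURCE A (Python) =====
-- def _read_messages_from_log(text_log: str):
--     human = True
--     messages = []
--     for line in text_log.splitlines()[:-1]:
--         if line.startswith('**'):
--             human = 'Human' in line
--             continue
--         stripped_line = line.strip('" ')
--         if stripped_line:
--             messages.append((human, stripped_line))
--     return messages
-- ===== SOURCE B (Python) =====
-- def _read_messages_from_log(text_log: str):
--     lines = text_log.splitlines()[:-1]
--     out = []
--     spk = True
--     while lines:
--         cut = next((i for i, l in enumerate(lines) if l.startswith('**')), len(lines))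
--         out += [(spk, t) for t in (l.strip('" ') for l in lines[:cut]) if t]
--         if cut == len(lines):
--             break
--         spk = 'Human' in lines[cut]
--         lines = lines[cut + 1:]
--     return out
-- ===== Notes on version B (the rewrite author's own statement) =====
-- stated objective: alternative
-- what changed: Replaces A's single stateful line loop (mutable current-speaker flag updated per line) with a section-at-a-time decomposition: split the lines at each '**' header, compute the section's speaker once, emit the stripped non-empty body lines of that section, and move to the next section.
import Mathlib
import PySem

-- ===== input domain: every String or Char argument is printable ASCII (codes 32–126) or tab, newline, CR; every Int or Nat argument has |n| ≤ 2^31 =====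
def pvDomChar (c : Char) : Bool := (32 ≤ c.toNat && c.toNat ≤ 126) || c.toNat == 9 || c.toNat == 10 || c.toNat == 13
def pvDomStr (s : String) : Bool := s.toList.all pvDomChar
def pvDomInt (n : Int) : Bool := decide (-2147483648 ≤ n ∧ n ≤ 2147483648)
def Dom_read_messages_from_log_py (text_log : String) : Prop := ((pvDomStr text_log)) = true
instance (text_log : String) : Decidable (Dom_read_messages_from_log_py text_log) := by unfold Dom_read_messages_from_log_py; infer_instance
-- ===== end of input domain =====

-- B re-decomposes A's stateful line loop into section-at-a-time processing (span at the
-- next '**' header, emit the section's body with one speaker, recurse); same cost, clearer shape.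

-- ===== PORT A =====
def read_messages_from_log_py (text_log : String) : List (Bool × String) :=
  let r := (PySem.List.slice (PySem.Str.splitlines text_log) none (some (-1))).foldl
    (fun (st : Bool × List (Bool × String)) line =>
      if PySem.Str.startswith line "**" then (PySem.Str.isIn "Human" line, st.2)
      else
        let stripped := PySem.Str.stripChars line "\" "
        if stripped ≠ "" then (st.1, st.2 ++ [(st.1, stripped)]) else st)
    (true, ([] : List (Bool × String)))
  r.2

-- ===== PORT B =====
-- one section at a time: body lines up to the next '**' header, then recurse past the header
def sectionsB (spk : Bool) (lines : List String) : List (Bool × String) :=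
  let emitted := (lines.takeWhile (fun l => !PySem.Str.startswith l "**")).filterMap
      (fun l => let t := PySem.Str.stripChars l "\" "
                if t ≠ "" then some (spk, t) else none)
  let rest := lines.dropWhile (fun l => !PySem.Str.startswith l "**")
  if hr : rest = [] then emitted
  else emitted ++ sectionsB (PySem.Str.isIn "Human" (rest.head hr)) rest.tail
termination_by lines.length
decreasing_by
  have hle := (List.dropWhile_sublist (l := lines) (fun l => !PySem.Str.startswith l "**")).length_le
  cases hrest : lines.dropWhile (fun l => !PySem.Str.startswith l "**") with
  | nil => exact absurd hrest hr
  | cons hd tl => rw [hrest] at hle; simp at hle ⊢; omega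

def read_messages_from_log_py_alt (text_log : String) : List (Bool × String) :=
  sectionsB true (PySem.List.slice (PySem.Str.splitlines text_log) none (some (-1)))

-- ===== PRECONDITION & SPEC =====
def Spec_read_messages_from_log_py (text_log : String) (out : List (Bool × String)) : Prop := out = read_messages_from_log_py_alt text_log
instance (text_log : String) (out : List (Bool × String)) : Decidable (Spec_read_messages_from_log_py text_log out) := by unfold Spec_read_messages_from_log_py; infer_instance

-- ===== CLAIM (what is proved, stated in full; the proofs are below) =====
def Claim_equal_read_messages_from_log_py : Prop := ∀ (text_log : String), Dom_read_messages_from_log_py text_log → Spec_read_messages_from_log_py text_log (read_messages_from_log_py text_log)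

-- ===== LEMMAS AND PROOFS =====

lemma sectionsB_nil (spk : Bool) : sectionsB spk [] = [] := by
  rw [sectionsB]; simp

lemma sectionsB_cons_header (spk : Bool) (l : String) (rest : List String)
    (h : PySem.Str.startswith l "**" = true) :
    sectionsB spk (l :: rest) = sectionsB (PySem.Str.isIn "Human" l) rest := by
  rw [sectionsB]
  simp only [List.takeWhile_cons, List.dropWhile_cons, h, Bool.not_true, Bool.false_eq_true,
    if_false, List.filterMap_nil]
  rw [dif_neg (List.cons_ne_nil l rest)]
  simp

lemma sectionsB_cons_body (spk : Bool) (l : String) (rest : List String)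
    (h : PySem.Str.startswith l "**" = false) :
    sectionsB spk (l :: rest) =
      (if PySem.Str.stripChars l "\" " ≠ "" then [(spk, PySem.Str.stripChars l "\" ")] else [])
        ++ sectionsB spk rest := by
  rw [sectionsB, sectionsB]
  simp only [List.takeWhile_cons, List.dropWhile_cons, h, Bool.not_false, if_true,
    List.filterMap_cons]
  by_cases hr : List.dropWhile (fun l => !PySem.Str.startswith l "**") rest = []
  · rw [dif_pos hr, dif_pos hr]
    split_ifs <;> simp_all
  · rw [dif_neg hr, dif_neg hr]
    split_ifs <;> simp_all

lemma foldl_eq_sectionsB (lines : List String) :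
    ∀ (spk : Bool) (acc : List (Bool × String)),
      (lines.foldl
        (fun (st : Bool × List (Bool × String)) line =>
          if PySem.Str.startswith line "**" then (PySem.Str.isIn "Human" line, st.2)
          else
            let stripped := PySem.Str.stripChars line "\" "
            if stripped ≠ "" then (st.1, st.2 ++ [(st.1, stripped)]) else st)
        (spk, acc)).2 = acc ++ sectionsB spk lines := by
  induction lines with
  | nil => intro spk acc; simp [sectionsB_nil]
  | cons l rest ih =>
    intro spk acc
    by_cases h : PySem.Str.startswith l "**" = true
    · simp only [List.foldl_cons, h, if_true, sectionsB_cons_header spk l rest h]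
      exact ih _ acc
    · rw [Bool.not_eq_true] at h
      rw [List.foldl_cons, sectionsB_cons_body spk l rest h]
      simp only [h, Bool.false_eq_true, if_false]
      by_cases ht : PySem.Str.stripChars l "\" " = ""
      · simp only [ht, ne_eq, not_true_eq_false, if_false, List.nil_append]
        exact ih spk acc
      · simp only [ne_eq, ht, not_false_eq_true, if_true]
        rw [ih spk (acc ++ [(spk, PySem.Str.stripChars l "\" ")])]
        simp

-- ===== VERDICT (by name: the statement is the Claim_ definition above) =====
theorem read_messages_from_log_py_spec : Claim_equal_read_messages_from_log_py := by
  intro text_log _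
  unfold Spec_read_messages_from_log_py read_messages_from_log_py read_messages_from_log_py_alt
  exact foldl_eq_sectionsB _ true []
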